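-- pv_equiv track=rewrite | github.com/JHLee1220/Algolab_algorithm_2024 | algo18_2.py | process
-- ===== SOURCE A (Python) =====
-- def partition(arr, l, h, scheme): #배열 arr의 구간 [i, h]을 피벗을 기준으로 나누는 함수
--     #arr:분할할 배열, l:분할할 구간의 시작 인덱스, h:구간의 끝 인덱스, scheme:분할 방식
--     pivot = arr[l]
--     i, j = l, h
--     s = c = 0 #s는 교환 횟수, c는 비교 횟수를 추적한다.
--     #Hoare 방식
--     if scheme == 'hoare':
--         i -= 1
--         j += 1
--         while True:
--             i += 1
--             while arr[i] < pivot: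
--                 c += 1
--                 i += 1
--             c += 1
--
--             j -= 1
--             while arr[j] > pivot:
--                 c += 1
--                 j -= 1
--             c += 1
--
--             if i < j:
--                 arr[i], arr[j] = arr[j], arr[i]
--                 s += 1
--             else:
--                 return j, s, c
--     #Lomuto방식
--     else:
--         for k in range(l + 1, h + 1):
--             c += 1
--             if arr[k] < pivot: #arr[k] < pivot 이면 i를 증가시키고 arr[i], arr[k]의 값을 교환한다.
--                 i += 1
--                 arr[i], arr[k] = arr[k], arr[i]
--                 s += 1
--         arr[l], arr[i] = arr[i], arr[l] #피벗을 i위치로 이동시킨다.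
--         s += 1
--         return i, s, c
--
-- def quicksort(arr, l, h, scheme): #주어진 배열을 재귀적으로 정렬
--     s = c = 0
--     if l < h:
--         p, s1, c1 = partition(arr, l, h, scheme)
--         s += s1
--         c += c1
--         s2, c2 = quicksort(arr, l, p - (scheme == 'lomuto'), scheme)
--         s3, c3 = quicksort(arr, p + 1, h, scheme)
--         s += s2 + s3
--         c += c2 + c3
--     return s, c
--
-- def process(T, test_cases): #T개의 테스트 케이스를 처리
--     results = []
--     for case in test_cases:
--         n, *arr = case
--         arr_hoare = arr[:]
--         arr_lomuto = arr[:]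
--
--         hoare_s, hoare_c = quicksort(arr_hoare, 0, n - 1, 'hoare')
--         lomuto_s, lomuto_c = quicksort(arr_lomuto, 0, n - 1, 'lomuto')
--
--         results.append(f"{hoare_s} {lomuto_s} {hoare_c} {lomuto_c}")
--
--     return results
-- ===== SOURCE B (Python) =====
-- def partition(arr, l, h, scheme):
--     pivot = arr[l]
--     i, j = l, h
--     s = c = 0
--     if scheme == 'hoare':
--         i -= 1
--         j += 1
--         while True:
--             i += 1
--             while arr[i] < pivot:
--                 c += 1
--                 i += 1
--             c += 1
--
--             j -= 1
--             while arr[j] > pivot: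
--                 c += 1
--                 j -= 1
--             c += 1
--
--             if i < j:
--                 arr[i], arr[j] = arr[j], arr[i]
--                 s += 1
--             else:
--                 return j, s, c
--     else:
--         for k in range(l + 1, h + 1):
--             c += 1
--             if arr[k] < pivot:
--                 i += 1
--                 arr[i], arr[k] = arr[k], arr[i]
--                 s += 1
--         arr[l], arr[i] = arr[i], arr[l]
--         s += 1
--         return i, s, c
--
--
-- def quicksort(arr, l, h, scheme):
--     # iterative: explicit LIFO stack of (l, h) ranges instead of recursion
--     s = c = 0
--     stack = [(l, h)]
--     while stack:
--         l, h = stack.pop()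
--         if l < h:
--             p, s1, c1 = partition(arr, l, h, scheme)
--             s += s1
--             c += c1
--             stack.append((p + 1, h))
--             stack.append((l, p - (scheme == 'lomuto')))
--     return s, c
--
--
-- def process(T, test_cases):
--     results = []
--     for case in test_cases:
--         n, *arr = case
--         arr_hoare = arr[:]
--         arr_lomuto = arr[:]
--
--         hoare_s, hoare_c = quicksort(arr_hoare, 0, n - 1, 'hoare')
--         lomuto_s, lomuto_c = quicksort(arr_lomuto, 0, n - 1, 'lomuto')
--
--         results.append(f"{hoare_s} {lomuto_s} {hoare_c} {lomuto_c}")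
--
--     return results
-- ===== Notes on version B (the rewrite author's own statement) =====
-- stated objective: alternative
-- what changed: quicksort is rewritten as an iterative routine driving an explicit LIFO stack of (l,h) ranges with running swap/comparison totals, instead of the two-way recursion; partition and process are unchanged.
import Mathlib
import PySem

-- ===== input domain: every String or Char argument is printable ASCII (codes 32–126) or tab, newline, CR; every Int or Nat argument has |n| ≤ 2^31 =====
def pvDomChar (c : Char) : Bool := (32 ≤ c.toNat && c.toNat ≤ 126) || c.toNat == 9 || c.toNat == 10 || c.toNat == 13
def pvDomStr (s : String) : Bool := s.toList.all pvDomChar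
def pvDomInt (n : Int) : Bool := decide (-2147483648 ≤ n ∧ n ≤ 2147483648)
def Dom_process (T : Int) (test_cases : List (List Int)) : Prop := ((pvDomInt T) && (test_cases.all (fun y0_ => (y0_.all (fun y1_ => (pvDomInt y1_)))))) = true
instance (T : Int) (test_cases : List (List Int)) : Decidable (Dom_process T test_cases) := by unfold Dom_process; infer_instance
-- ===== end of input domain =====

-- B rewrites `quicksort` as an explicit-stack worklist instead of recursion (same `partition`,
-- same totals); equivalence is about the RETURN value of `process` (the Python versions mutate
-- their local copies of each case's array in place).

-- ===== PORT A =====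
-- shared helper: `partition` is textually identical in A and B (both ports use it).
-- Python's  arr[i], arr[j] = arr[j], arr[i]  (only executed with both indices in range)
def pvSwap (a : List Int) (i j : Int) : List Int :=
  PySem.List.pySetD (PySem.List.pySetD a i (PySem.List.pyGetD a j 0)) j (PySem.List.pyGetD a i 0)

-- `while arr[i] < pivot: c += 1; i += 1` — returns the final i and the number of iterations;
-- the Nat fuel is only a structural-recursion guard: 2*len(a)+2 always outlasts the scan,
-- so `none` means exactly Python's IndexError.
def scanUp (fuel : Nat) (a : List Int) (pivot : Int) (i : Int) : Option (Int × Int) :=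
  match fuel with
  | 0 => none
  | f + 1 =>
    match PySem.List.pyGet? a i with
    | none => none
    | some v =>
        if v < pivot then (scanUp f a pivot (i + 1)).map (fun p => (p.1, p.2 + 1))
        else some (i, 0)

-- `while arr[j] > pivot: c += 1; j -= 1`
def scanDown (fuel : Nat) (a : List Int) (pivot : Int) (j : Int) : Option (Int × Int) :=
  match fuel with
  | 0 => none
  | f + 1 =>
    match PySem.List.pyGet? a j with
    | none => none
    | some v =>
        if v > pivot then (scanDown f a pivot (j - 1)).map (fun p => (p.1, p.2 + 1))
        else some (j, 0)

-- the Hoare `while True` loop; returns (arr, j, s, c); fuel again a pure totality guard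
-- (each iteration shrinks j - i by at least 2)
def hoareLoop (fuel : Nat) (a : List Int) (pivot : Int) (i j s c : Int) :
    Option (List Int × Int × Int × Int) :=
  match fuel with
  | 0 => none
  | f + 1 =>
    match scanUp (2 * a.length + 2) a pivot (i + 1) with
    | none => none
    | some (i', ci) =>
      match scanDown (2 * a.length + 2) a pivot (j - 1) with
      | none => none
      | some (j', cj) =>
        if i' < j' then
          hoareLoop f (pvSwap a i' j') pivot i' j' (s + 1) (c + ci + 1 + cj + 1)
        else some (a, j', s, c + ci + 1 + cj + 1)

-- `partition(arr, l, h, scheme)` — returns (arr, p, s, c); none = IndexError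
def partitionFn (a : List Int) (l h : Int) (scheme : String) :
    Option (List Int × Int × Int × Int) :=
  match PySem.List.pyGet? a l with
  | none => none
  | some pivot =>
    if scheme == "hoare" then
      hoareLoop ((h - l + 4).toNat) a pivot (l - 1) (h + 1) 0 0
    else
      match (PySem.List.pyRange (l + 1) (h + 1) 1).foldl
          (fun st k =>
            st.bind fun q =>
              match PySem.List.pyGet? q.1 k with
              | none => none
              | some v =>
                if v < pivot then
                  some (pvSwap q.1 (q.2.1 + 1) k, q.2.1 + 1, q.2.2.1 + 1, q.2.2.2 + 1)
                else some (q.1, q.2.1, q.2.2.1, q.2.2.2 + 1))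
          (some (a, l, 0, 0)) with
      | none => none
      | some (a1, i, s, c) => some (pvSwap a1 l i, i, s + 1, c)

-- A's recursive `quicksort`, with a fuel counter threaded through the recursion as a totality
-- guard (the subtype bound `≤ fuel` only justifies termination; `none` on exhaustion).
def qsA (fuel : Nat) (a : List Int) (l h : Int) (scheme : String) :
    Option (List Int × Int × Int × {k : Nat // k ≤ fuel}) :=
  match fuel with
  | 0 => none
  | f + 1 =>
    if l < h then
      match partitionFn a l h scheme with
      | none => none
      | some (a1, p, s1, c1) =>
        match qsA f a1 l (p - (if scheme == "lomuto" then 1 else 0)) scheme with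
        | none => none
        | some (a2, s2, c2, f2) =>
          match qsA f2.1 a2 (p + 1) h scheme with
          | none => none
          | some (a3, s3, c3, f3) =>
              some (a3, s1 + (s2 + s3), c1 + (c2 + c3),
                    ⟨f3.1, le_trans (le_trans f3.2 f2.2) (Nat.le_succ f)⟩)
    else some (a, 0, 0, ⟨f, Nat.le_succ f⟩)
termination_by fuel
decreasing_by
  · exact Nat.lt_succ_self f
  · exact Nat.lt_succ_of_le f2.2

def process (T : Int) (test_cases : List (List Int)) : List String :=
  test_cases.map (fun case =>
    match case with
    | [] => ""          -- Python raises here (excluded by Pre_)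
    | n :: arr =>
      match qsA (2 * n.toNat + 3) arr 0 (n - 1) "hoare" with
      | none => ""      -- IndexError in Python (excluded by Pre_)
      | some (_, hoare_s, hoare_c, _) =>
        match qsA (2 * n.toNat + 3) arr 0 (n - 1) "lomuto" with
        | none => ""
        | some (_, lomuto_s, lomuto_c, _) =>
          PySem.Int.toStr hoare_s ++ " " ++ PySem.Int.toStr lomuto_s ++ " " ++
            PySem.Int.toStr hoare_c ++ " " ++ PySem.Int.toStr lomuto_c)

-- ===== PORT B =====
-- B's iterative `quicksort`: an explicit LIFO stack of (l, h) ranges and running totals;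
-- the same fuel guard, one unit per popped range.
def stackLoop (fuel : Nat) (st : List (Int × Int)) (a : List Int) (s c : Int)
    (scheme : String) : Option (List Int × Int × Int) :=
  match st, fuel with
  | [], _ => some (a, s, c)
  | (_, _) :: _, 0 => none
  | (l, h) :: rest, f + 1 =>
      if l < h then
        match partitionFn a l h scheme with
        | none => none
        | some (a1, p, s1, c1) =>
          stackLoop f ((l, p - (if scheme == "lomuto" then 1 else 0)) :: (p + 1, h) :: rest)
            a1 (s + s1) (c + c1) scheme
      else stackLoop f rest a s c scheme

def process_alt (T : Int) (test_cases : List (List Int)) : List String :=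
  test_cases.map (fun case =>
    match case with
    | [] => ""
    | n :: arr =>
      match stackLoop (2 * n.toNat + 3) [(0, n - 1)] arr 0 0 "hoare" with
      | none => ""
      | some (_, hoare_s, hoare_c) =>
        match stackLoop (2 * n.toNat + 3) [(0, n - 1)] arr 0 0 "lomuto" with
        | none => ""
        | some (_, lomuto_s, lomuto_c) =>
          PySem.Int.toStr hoare_s ++ " " ++ PySem.Int.toStr lomuto_s ++ " " ++
            PySem.Int.toStr hoare_c ++ " " ++ PySem.Int.toStr lomuto_c)

-- ===== PRECONDITION & SPEC =====
-- Pre_ excludes exactly the inputs on which the Python raises: an empty case (unpacking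
-- `n, *arr = case` raises ValueError) and a case whose count n exceeds len(arr) with n ≥ 2
-- (quicksort then indexes past the end of the array: IndexError).
def Pre_process (T : Int) (test_cases : List (List Int)) : Prop :=
  ∀ case ∈ test_cases, case ≠ [] ∧ (case.headI ≤ (case.length : Int) - 1 ∨ case.headI ≤ 1)
instance (T : Int) (test_cases : List (List Int)) : Decidable (Pre_process T test_cases) := by
  unfold Pre_process; infer_instance

def pvWitness_process : Int × List (List Int) := (3, [[3, 2, 1, 3], [0], [2, 5, 4], [4, 1, 1, 2, 1]])

def Spec_process (T : Int) (test_cases : List (List Int)) (out : List String) : Prop := out = process_alt T test_cases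
instance (T : Int) (test_cases : List (List Int)) (out : List String) : Decidable (Spec_process T test_cases out) := by unfold Spec_process; infer_instance

-- ===== CLAIM (what is proved, stated in full; the proofs are below) =====
def Claim_equal_process : Prop := ∀ (T : Int) (test_cases : List (List Int)), Dom_process T test_cases → Pre_process T test_cases → Spec_process T test_cases (process T test_cases)

-- ===== LEMMAS AND PROOFS =====

-- fuel correspondence: processing (l, h) on top of the stack is exactly one recursive
-- quicksort call on [l, h] followed by the rest of the stack with the remaining fuel.
theorem stackLoop_cons (fuel : Nat) :
    ∀ (l h : Int) (st : List (Int × Int)) (a : List Int) (s c : Int) (scheme : String),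
    stackLoop fuel ((l, h) :: st) a s c scheme =
      match qsA fuel a l h scheme with
      | none => none
      | some (a1, s1, c1, f1) => stackLoop f1.1 st a1 (s + s1) (c + c1) scheme := by
  induction fuel using Nat.strong_induction_on with
  | _ fuel ih =>
    intro l h st a s c scheme
    match fuel with
    | 0 => simp only [stackLoop, qsA]
    | f + 1 =>
      simp only [stackLoop, qsA]
      by_cases hlh : l < h
      · simp only [if_pos hlh]
        cases hp : partitionFn a l h scheme with
        | none => rfl
        | some q =>
          obtain ⟨a1, p, s1, c1⟩ := q
          simp only
          rw [ih f (Nat.lt_succ_self f)]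
          cases hq1 : qsA f a1 l (p - (if scheme == "lomuto" then 1 else 0)) scheme with
          | none => rfl
          | some r =>
            obtain ⟨a2, s2, c2, f2⟩ := r
            simp only
            rw [ih f2.1 (Nat.lt_succ_of_le f2.2)]
            cases hq2 : qsA f2.1 a2 (p + 1) h scheme with
            | none => rfl
            | some r2 =>
              obtain ⟨a3, s3, c3, f3⟩ := r2
              simp only
              congr 1 <;> ring
      · simp only [if_neg hlh, add_zero]

theorem stackLoop_single (fuel : Nat) (l h : Int) (a : List Int) (scheme : String) :
    stackLoop fuel [(l, h)] a 0 0 scheme =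
      match qsA fuel a l h scheme with
      | none => none
      | some (a1, s1, c1, _) => some (a1, s1, c1) := by
  rw [stackLoop_cons]
  match qsA fuel a l h scheme with
  | none => rfl
  | some (a1, s1, c1, f1) => simp [stackLoop]

-- ===== VERDICT (by name: the statement is the Claim_ definition above) =====
theorem process_spec : Claim_equal_process := by
  intro T test_cases _ _
  unfold Spec_process process process_alt
  apply List.map_congr_left
  intro case _
  match case with
  | [] => rfl
  | n :: arr =>
    simp only [stackLoop_single]
    match qsA (2 * n.toNat + 3) arr 0 (n - 1) "hoare" with
    | none => rfl
    | some (_, hs, hc, _) =>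
      match qsA (2 * n.toNat + 3) arr 0 (n - 1) "lomuto" with
      | none => rfl
      | some _ => rfl
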